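-- pv_equiv track=rewrite | github.com/facebookresearch/FnCTOD | src/multiwoz/postprocess.py | zip_session_data
-- ===== SOURCE A (Python) =====
-- def zip_session_data(data):
--     dial_data = {}
--     for turn in data:
--         dial_id = turn["dial_id"]
--         if dial_id in dial_data:
--             dial_data[dial_id].append(turn)
--         else:
--             dial_data[dial_id] = [turn]
--     # sort the turns in each dialog
--     for dial_id, dial_turns in dial_data.items():
--         sorted_turns = sorted(dial_turns, key=lambda d: d["turn_num"])
--         dial_data[dial_id] = sorted_turns
--     return dial_data
-- ===== SOURCE B (Python) =====
-- def zip_session_data(data):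
--     groups = {}
--     for turn in sorted(data, key=lambda d: d["turn_num"]):
--         groups.setdefault(turn["dial_id"], []).append(turn)
--     # dict keys in first-appearance order of the original data
--     return {turn["dial_id"]: groups[turn["dial_id"]] for turn in data}
-- ===== Notes on version B (the rewrite author's own statement) =====
-- stated objective: alternative
-- what changed: A builds a dict of per-dialog lists and then sorts each dialog's list separately; B performs one stable global sort by turn_num, groups the already-sorted turns in a single setdefault pass, and emits the dict in first-appearance key order.
import Mathlib
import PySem

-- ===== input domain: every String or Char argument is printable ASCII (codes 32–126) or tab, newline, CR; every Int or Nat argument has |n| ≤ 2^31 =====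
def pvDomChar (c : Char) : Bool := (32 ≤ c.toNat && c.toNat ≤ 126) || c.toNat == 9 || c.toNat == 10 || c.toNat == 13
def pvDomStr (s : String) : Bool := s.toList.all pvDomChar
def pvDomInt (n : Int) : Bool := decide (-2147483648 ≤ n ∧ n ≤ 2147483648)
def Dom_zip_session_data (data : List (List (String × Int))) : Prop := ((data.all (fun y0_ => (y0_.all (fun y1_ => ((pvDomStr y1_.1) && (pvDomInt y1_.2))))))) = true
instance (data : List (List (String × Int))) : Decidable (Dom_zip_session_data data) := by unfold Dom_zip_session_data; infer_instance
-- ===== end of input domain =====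

-- B replaces A's group-then-sort-each-group by one stable global sort followed by a grouping pass
-- (objective: alternative decomposition, not claimed faster); return values only, neither mutates its argument.

-- turn[k] on a Python dict argument (a missing key is a KeyError, excluded by Pre_)
def pvTurnGet (t : List (String × Int)) (k : String) : Int := (PySem.Dict.ofList t).getD k 0

-- ===== PORT A =====
def zip_session_data (data : List (List (String × Int))) : List (Int × List (List (String × Int))) :=
  let dial_data := data.foldl (fun d turn =>
      let dial_id := pvTurnGet turn "dial_id"
      if d.contains dial_id then d.insert dial_id (d.getD dial_id [] ++ [turn])
      else d.insert dial_id [turn]) PySem.Dict.empty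
  (dial_data.items.foldl (fun d p =>
      d.insert p.1 (PySem.List.sorted p.2 (fun t => pvTurnGet t "turn_num"))) dial_data).items

-- ===== PORT B =====
def zip_session_data_alt (data : List (List (String × Int))) : List (Int × List (List (String × Int))) :=
  let groups := (PySem.List.sorted data (fun t => pvTurnGet t "turn_num")).foldl
      (fun d turn =>
        let d2 := d.setdefault (pvTurnGet turn "dial_id") []
        d2.insert (pvTurnGet turn "dial_id") (d2.getD (pvTurnGet turn "dial_id") [] ++ [turn]))
      PySem.Dict.empty
  (data.foldl (fun d turn =>
      d.insert (pvTurnGet turn "dial_id") (groups.getD (pvTurnGet turn "dial_id") []))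
      PySem.Dict.empty).items

-- ===== PRECONDITION & SPEC =====
-- Pre_ excludes turns missing a "dial_id" or "turn_num" key, on which the Python raises KeyError.
def Pre_zip_session_data (data : List (List (String × Int))) : Prop :=
  ∀ t ∈ data, (PySem.Dict.ofList t).contains "dial_id" = true ∧ (PySem.Dict.ofList t).contains "turn_num" = true
instance (data : List (List (String × Int))) : Decidable (Pre_zip_session_data data) := by unfold Pre_zip_session_data; infer_instance
def pvWitness_zip_session_data : (List (List (String × Int))) :=
  [[("dial_id", 1), ("turn_num", 2)], [("dial_id", 1), ("turn_num", 0)]]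
def Spec_zip_session_data (data : List (List (String × Int))) (out : List (Int × List (List (String × Int)))) : Prop := out = zip_session_data_alt data
instance (data : List (List (String × Int))) (out : List (Int × List (List (String × Int)))) : Decidable (Spec_zip_session_data data out) := by unfold Spec_zip_session_data; infer_instance

-- ===== CLAIM (what is proved, stated in full; the proofs are below) =====
def Claim_equal_zip_session_data : Prop := ∀ (data : List (List (String × Int))), Dom_zip_session_data data → Pre_zip_session_data data → Spec_zip_session_data data (zip_session_data data)

-- ===== LEMMAS AND PROOFS =====

-- both grouping loop bodies are dict.modify k [] (· ++ [turn])
theorem pv_stepA {ν : Type} (d : PySem.Dict Int (List ν)) (k : Int) (t : ν) :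
    (if d.contains k then d.insert k (d.getD k [] ++ [t]) else d.insert k [t])
      = d.modify k [] (· ++ [t]) := by
  by_cases h : d.contains k = true
  · simp [h, PySem.Dict.modify]
  · simp only [Bool.not_eq_true] at h
    simp [h, PySem.Dict.modify, PySem.Dict.getD_of_not_contains _ _ h]

theorem pv_stepB {ν : Type} (d : PySem.Dict Int (List ν)) (k : Int) (t : ν) :
    ((d.setdefault k []).insert k ((d.setdefault k []).getD k [] ++ [t]))
      = d.modify k [] (· ++ [t]) := by
  by_cases h : d.contains k = true
  · rw [PySem.Dict.setdefault_of_contains _ _ h]; rfl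
  · simp only [Bool.not_eq_true] at h
    rw [PySem.Dict.setdefault_of_not_contains _ _ h]
    simp [PySem.Dict.getD_insert_self, PySem.Dict.insert_insert_self,
      PySem.Dict.modify, PySem.Dict.getD_of_not_contains _ _ h]

-- the grouping fold, characterised: keys = first-occurrence dedup, value at k = the k-filter
theorem pv_group_keys {ν : Type} (key : ν → Int) (l : List ν) :
    (l.foldl (fun d t => d.modify (key t) [] (· ++ [t])) PySem.Dict.empty).keys
      = PySem.Set.ofList (l.map key) := by
  rw [PySem.Dict.keys_foldl_modify_key l key [] (fun _ t => (· ++ [t]))]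
  simp [PySem.Set.ofList, PySem.Set.update, PySem.Dict.keys_empty, PySem.Set.empty]

theorem pv_group_getD {ν : Type} (key : ν → Int) (l : List ν) (k : Int) :
    (l.foldl (fun d t => d.modify (key t) [] (· ++ [t])) PySem.Dict.empty).getD k []
      = l.filter (fun t => key t == k) := by
  have h : l.foldl (fun d t => d.modify (key t) [] (· ++ [t])) PySem.Dict.empty
      = (l.map (fun t => (key t, t))).foldl (fun d p => d.modify p.1 [] (· ++ [p.2])) PySem.Dict.empty := by
    rw [List.foldl_map]
  rw [h, PySem.Dict.getD_foldl_modify_append]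
  simp [List.filter_map, Function.comp_def]

theorem pv_group_nodup {ν : Type} (key : ν → Int) (l : List ν) :
    (l.foldl (fun d t => d.modify (key t) [] (· ++ [t])) PySem.Dict.empty).keys.Nodup := by
  rw [pv_group_keys]; exact PySem.Set.nodup_ofList _

theorem pv_group_items {ν : Type} (key : ν → Int) (l : List ν) :
    (l.foldl (fun d t => d.modify (key t) [] (· ++ [t])) PySem.Dict.empty).items
      = (PySem.Set.ofList (l.map key)).map (fun k => (k, l.filter (fun t => key t == k))) := by
  rw [PySem.Dict.items_eq_map_keys _ (pv_group_nodup key l) [], pv_group_keys]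
  exact List.map_congr_left (fun k _ => by rw [pv_group_getD])

-- A's second loop: re-inserting every existing key with a function of its value maps over the items
theorem pv_fold_over_items {ν : Type} (s : ν → ν) :
    ∀ (l l₀ : List (Int × ν)) (d : PySem.Dict Int ν),
    d.items = l₀ ++ l → d.keys.Nodup →
    (l.foldl (fun d p => d.insert p.1 (s p.2)) d).items = l₀ ++ l.map (fun p => (p.1, s p.2)) := by
  intro l
  induction l with
  | nil => intro l₀ d h _; simpa using h
  | cons p l ih =>
    intro l₀ d h hnd
    have hkeys : d.keys = l₀.map Prod.fst ++ p.1 :: l.map Prod.fst := by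
      simp [PySem.Dict.keys, h]
    have hnd2 := hkeys ▸ hnd
    have hct : d.contains p.1 = true := by
      rw [PySem.Dict.contains_iff_mem_keys, hkeys]; simp
    have hne : ∀ q ∈ l₀ ++ l, q.1 ≠ p.1 := by
      intro q hq he
      rcases List.mem_append.mp hq with h0 | h1
      · exact (List.nodup_append.mp hnd2).2.2 q.1 (List.mem_map_of_mem h0) p.1
          (List.mem_cons_self) he
      · exact (List.nodup_cons.mp (List.nodup_append.mp hnd2).2.1).1
          (he ▸ List.mem_map_of_mem h1)
    have hmap : ∀ (m : List (Int × ν)), (∀ q ∈ m, q.1 ≠ p.1) →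
        m.map (fun q => if (q.1 == p.1) then (p.1, s p.2) else q) = m := by
      intro m hm
      rw [List.map_congr_left (g := fun q => q) (fun q hq => by simp [hm q hq])]
      simp
    have hitems : (d.insert p.1 (s p.2)).items = (l₀ ++ [(p.1, s p.2)]) ++ l := by
      rw [PySem.Dict.items_insert_of_contains _ _ hct, h]
      simp only [List.map_append, List.map_cons, beq_self_eq_true, if_pos]
      rw [hmap l₀ (fun q hq => hne q (List.mem_append_left _ hq)),
          hmap l (fun q hq => hne q (List.mem_append_right _ hq))]
      simp
    have hnd' : (d.insert p.1 (s p.2)).keys.Nodup := by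
      have hk : (d.insert p.1 (s p.2)).keys = d.keys := by
        simp [PySem.Dict.keys, hitems, h]
      rw [hk]; exact hnd
    have := ih (l₀ ++ [(p.1, s p.2)]) (d.insert p.1 (s p.2)) (by rw [hitems, List.append_assoc]) hnd'
    simpa [List.append_assoc] using this

theorem pv_fold_over_items' {ν : Type} (s : ν → ν) (d : PySem.Dict Int ν) (hnd : d.keys.Nodup) :
    (d.items.foldl (fun d p => d.insert p.1 (s p.2)) d).items = d.items.map (fun p => (p.1, s p.2)) := by
  have h := pv_fold_over_items s d.items [] d (by simp) hnd
  simpa using h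

-- B's final loop: inserting a function of the key keeps the "items = keys.map" shape
theorem pv_fold_keyfun {α ν : Type} (key : α → Int) (v : Int → ν) :
    ∀ (l : List α) (d : PySem.Dict Int ν),
    d.items = d.keys.map (fun k => (k, v k)) →
    (l.foldl (fun d t => d.insert (key t) (v (key t))) d).items
      = (PySem.Set.update d.keys (l.map key)).map (fun k => (k, v k)) := by
  intro l
  induction l with
  | nil => intro d h; simpa [PySem.Set.update] using h
  | cons t l ih =>
    intro d h
    simp only [List.foldl_cons, List.map_cons]
    have hinv : (d.insert (key t) (v (key t))).items
        = (d.insert (key t) (v (key t))).keys.map (fun k => (k, v k)) := by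
      by_cases hc : d.contains (key t) = true
      · rw [PySem.Dict.items_insert_of_contains _ _ hc, PySem.Dict.keys_insert_of_contains _ _ hc,
          h, List.map_map]
        apply List.map_congr_left
        intro k _
        by_cases hb : k = key t <;> simp [Function.comp, hb]
      · have hc' : d.contains (key t) = false := by simpa using hc
        rw [PySem.Dict.items_insert_of_not_contains _ _ hc',
          PySem.Dict.keys_insert_of_not_contains _ _ hc', List.map_append, h]
        simp
    have hupd : PySem.Set.update d.keys (key t :: l.map key)
        = PySem.Set.update ((d.insert (key t) (v (key t))).keys) (l.map key) := by
      by_cases hc : d.contains (key t) = true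
      · rw [PySem.Dict.keys_insert_of_contains _ _ hc]
        have hmem : key t ∈ d.keys := (PySem.Dict.contains_iff_mem_keys d (key t)).mp hc
        simp [PySem.Set.update, PySem.Set.add, hmem]
      · have hc' : d.contains (key t) = false := by simpa using hc
        have hmem : ¬ key t ∈ d.keys := by
          intro hm
          rw [(PySem.Dict.contains_iff_mem_keys d (key t)).mpr hm] at hc'
          simp at hc'
        rw [PySem.Dict.keys_insert_of_not_contains _ _ hc']
        simp [PySem.Set.update, PySem.Set.add, hmem]
    rw [hupd]
    exact ih _ hinv

-- stability of the sort: filtering commutes with PySem.List.sorted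
theorem pv_insertBy_front {α : Type} (key : α → Int) (x : α) (zs : List α)
    (h : ∀ z ∈ zs, key x < key z) :
    PySem.List.insertBy (fun a b => decide (key a < key b)) x zs = x :: zs := by
  cases zs with
  | nil => simp [PySem.List.insertBy]
  | cons z zs => simp [PySem.List.insertBy, h z List.mem_cons_self]

theorem pv_filter_insertBy {α : Type} (key : α → Int) (p : α → Bool) (x : α) :
    ∀ (ys : List α), ys.Pairwise (fun a b => key a ≤ key b) →
    (PySem.List.insertBy (fun a b => decide (key a < key b)) x ys).filter p
      = if p x then PySem.List.insertBy (fun a b => decide (key a < key b)) x (ys.filter p)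
        else ys.filter p := by
  intro ys
  induction ys with
  | nil =>
    intro _
    by_cases hp : p x = true <;> simp [PySem.List.insertBy, List.filter, hp]
  | cons y ys ih =>
    intro hpw
    have hy : ∀ b ∈ ys, key y ≤ key b := fun b hb => List.rel_of_pairwise_cons hpw hb
    have hpw' : ys.Pairwise (fun a b => key a ≤ key b) := hpw.of_cons
    by_cases hlt : key x < key y
    · rw [show PySem.List.insertBy (fun a b => decide (key a < key b)) x (y :: ys) = x :: y :: ys by
        simp [PySem.List.insertBy, hlt]]
      by_cases hp : p x = true
      · rw [List.filter_cons_of_pos hp, if_pos hp,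
          pv_insertBy_front key x ((y :: ys).filter p) ?_]
        intro z hz
        have hz' := List.mem_of_mem_filter hz
        rcases List.mem_cons.mp hz' with rfl | hz2
        · exact hlt
        · exact lt_of_lt_of_le hlt (hy z hz2)
      · have hp' : p x = false := by simpa using hp
        rw [List.filter_cons_of_neg (by simp [hp']), if_neg (by simp [hp'])]
    · rw [show PySem.List.insertBy (fun a b => decide (key a < key b)) x (y :: ys)
          = y :: PySem.List.insertBy (fun a b => decide (key a < key b)) x ys by
        simp [PySem.List.insertBy, hlt]]
      by_cases hpy : p y = true
      · rw [List.filter_cons_of_pos hpy, ih hpw', List.filter_cons_of_pos hpy]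
        by_cases hp : p x = true
        · rw [if_pos hp, if_pos hp,
            show PySem.List.insertBy (fun a b => decide (key a < key b)) x (y :: ys.filter p)
              = y :: PySem.List.insertBy (fun a b => decide (key a < key b)) x (ys.filter p) by
            simp [PySem.List.insertBy, hlt]]
        · have hp' : p x = false := by simpa using hp
          simp [hp']
      · have hpy' : p y = false := by simpa using hpy
        rw [List.filter_cons_of_neg (by simp [hpy']), ih hpw', List.filter_cons_of_neg (by simp [hpy'])]

theorem pv_sorted_append_singleton {α : Type} (key : α → Int) (xs : List α) (x : α) :
    PySem.List.sorted (xs ++ [x]) key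
      = PySem.List.insertBy (fun a b => decide (key a < key b)) x (PySem.List.sorted xs key) := by
  rw [PySem.List.sorted_eq_foldl_insertBy, PySem.List.sorted_eq_foldl_insertBy, List.foldl_append]
  rfl

theorem pv_filter_sorted {α : Type} (key : α → Int) (p : α → Bool) (xs : List α) :
    (PySem.List.sorted xs key).filter p = PySem.List.sorted (xs.filter p) key := by
  induction xs using List.reverseRecOn with
  | nil => simp [PySem.List.sorted_eq_foldl_insertBy]
  | append_singleton xs x ih =>
    rw [pv_sorted_append_singleton, pv_filter_insertBy key p x _ (PySem.List.sorted_pairwise xs key),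
      List.filter_append]
    by_cases hp : p x = true
    · rw [if_pos hp, ih, show List.filter p [x] = [x] by simp [hp], pv_sorted_append_singleton]
    · have hp' : p x = false := by simpa using hp
      rw [if_neg (by simp [hp']), ih, show List.filter p [x] = [] by simp [hp'], List.append_nil]

-- the common normal form of both programs
theorem pv_A_items (data : List (List (String × Int))) :
    zip_session_data data
      = (PySem.Set.ofList (data.map (fun t => pvTurnGet t "dial_id"))).map
          (fun k => (k, PySem.List.sorted
            (data.filter (fun t => pvTurnGet t "dial_id" == k)) (fun t => pvTurnGet t "turn_num"))) := by
  unfold zip_session_data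
  simp only [pv_stepA]
  rw [pv_fold_over_items' (fun v => PySem.List.sorted v (fun t => pvTurnGet t "turn_num"))
    (data.foldl (fun d turn => d.modify (pvTurnGet turn "dial_id") [] (· ++ [turn])) PySem.Dict.empty)
    (pv_group_nodup _ data), pv_group_items]
  simp [List.map_map, Function.comp_def]

theorem pv_B_items (data : List (List (String × Int))) :
    zip_session_data_alt data
      = (PySem.Set.ofList (data.map (fun t => pvTurnGet t "dial_id"))).map
          (fun k => (k, PySem.List.sorted
            (data.filter (fun t => pvTurnGet t "dial_id" == k)) (fun t => pvTurnGet t "turn_num"))) := by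
  unfold zip_session_data_alt
  simp only [pv_stepB]
  rw [pv_fold_keyfun (fun t => pvTurnGet t "dial_id")
    (fun k => ((PySem.List.sorted data (fun t => pvTurnGet t "turn_num")).foldl
        (fun (d : PySem.Dict Int (List (List (String × Int)))) turn =>
          d.modify (pvTurnGet turn "dial_id") [] (fun x => x ++ [turn])) PySem.Dict.empty).getD k [])
    data PySem.Dict.empty rfl]
  have hkeys : PySem.Set.update (PySem.Dict.empty (κ := Int) (ν := List (List (String × Int)))).keys
      (data.map (fun t => pvTurnGet t "dial_id"))
      = PySem.Set.ofList (data.map (fun t => pvTurnGet t "dial_id")) := rfl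
  rw [hkeys]
  apply List.map_congr_left
  intro k _
  rw [pv_group_getD, pv_filter_sorted]

-- ===== VERDICT (by name: the statement is the Claim_ definition above) =====
theorem zip_session_data_spec : Claim_equal_zip_session_data := by
  intro data _ _
  unfold Spec_zip_session_data
  rw [pv_A_items, pv_B_items]
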